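-- pv_equiv track=rewrite | github.com/Atharvojha/genetic_sudoku | ga_solver.py | repair_sequence
-- ===== SOURCE A (Python) =====
-- def repair_sequence(seq, allowed):
--     """
--     Repair a sequence so that it forms a permutation of the allowed numbers.
--     It replaces duplicates (or invalid values) with the missing numbers.
--     """
--     result = seq.copy()
--     counts = {}
--     for num in result:
--         counts[num] = counts.get(num, 0) + 1
--     # Find which numbers are missing from the allowed set.
--     missing = [num for num in allowed if num not in result]
--     # Replace duplicates with missing numbers.
--     for i in range(len(result)):
--         if result[i] not in allowed:
--             if missing:
--                 result[i] = missing.pop()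
--         else:
--             if counts[result[i]] > 1:
--                 counts[result[i]] -= 1
--                 if missing:
--                     result[i] = missing.pop()
--     return result
-- ===== SOURCE B (Python) =====
-- def repair_sequence(seq, allowed):
--     """
--     Repair a sequence so that it forms a permutation of the allowed numbers.
--     Two stages: first scan RIGHT-TO-LEFT with a seen-set to mark which slots
--     keep their value (an allowed value at its last occurrence); then a fill
--     stage substitutes the marked-for-replacement slots from an iterator over
--     the missing numbers, keeping the original value once it is exhausted.
--     """
--     allowed_set = set(allowed)
--     seen = set()
--     keep = [False] * len(seq)
--     for i in range(len(seq) - 1, -1, -1):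
--         v = seq[i]
--         if v in allowed_set and v not in seen:
--             keep[i] = True
--             seen.add(v)
--     present = set(seq)
--     fill = iter([x for x in reversed(allowed) if x not in present])
--     return [v if k else next(fill, v) for k, v in zip(keep, seq)]
-- ===== Notes on version B (the rewrite author's own statement) =====
-- stated objective: faster
-- what changed: Replaces A's single in-place pass with a mutating count dictionary, O(n)-list membership tests and end-popping by a two-stage mark-then-fill algorithm: a right-to-left scan with hash sets marks which slots keep their value (an allowed value at its last occurrence), then a separate fill stage substitutes the unmarked slots from an iterator over the missing numbers.
import Mathlib
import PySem

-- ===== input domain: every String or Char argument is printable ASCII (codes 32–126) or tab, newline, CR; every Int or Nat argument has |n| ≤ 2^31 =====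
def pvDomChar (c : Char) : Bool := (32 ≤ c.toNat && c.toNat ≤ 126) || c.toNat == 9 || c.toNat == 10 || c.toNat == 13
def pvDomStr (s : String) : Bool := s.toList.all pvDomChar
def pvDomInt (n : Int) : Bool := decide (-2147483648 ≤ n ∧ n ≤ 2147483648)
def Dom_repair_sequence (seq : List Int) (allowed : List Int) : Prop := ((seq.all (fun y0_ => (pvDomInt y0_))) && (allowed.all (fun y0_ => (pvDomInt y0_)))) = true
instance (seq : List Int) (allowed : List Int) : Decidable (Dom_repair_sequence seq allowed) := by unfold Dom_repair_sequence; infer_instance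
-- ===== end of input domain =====

-- B replaces A's in-place pass with a count dict by a two-stage mark-then-fill algorithm:
-- a right-to-left seen-set scan marks the kept slots, then a fill stage substitutes
-- the rest from the missing numbers using hash sets (objective: faster; measured).

-- ===== PORT A =====
-- the 'for i in range(len(result))' loop: structural recursion over the remaining suffix,
-- carrying counts and missing; 'missing.pop()' = take the last element
def repairLoopA (allowed : List Int) : List Int → PySem.Dict Int Int → List Int → List Int
  | [], _, _ => []
  | v :: rest, cs, ms =>
    if v ∈ allowed then
      if cs.getD v 0 > 1 then
        let cs' := cs.insert v (cs.getD v 0 - 1)   -- counts[result[i]] -= 1 (key present)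
        match ms.getLast? with
        | some x => x :: repairLoopA allowed rest cs' ms.dropLast
        | none   => v :: repairLoopA allowed rest cs' ms
      else v :: repairLoopA allowed rest cs ms
    else
      match ms.getLast? with
      | some x => x :: repairLoopA allowed rest cs ms.dropLast
      | none   => v :: repairLoopA allowed rest cs ms

def repair_sequence (seq : List Int) (allowed : List Int) : List Int :=
  let result := seq
  let counts := result.foldl (fun d num => d.modify num 0 (· + 1)) PySem.Dict.empty
  let missing := allowed.filter (fun num => ¬ result.contains num)
  repairLoopA allowed result counts missing

-- ===== PORT B =====
-- the right-to-left marking loop 'for i in range(len(seq)-1, -1, -1)': structural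
-- recursion (the recursive call handles the suffix first, i.e. the elements to the
-- right), returning the keep mask and the seen-set
def markKeep (allowedS : PySem.Set Int) : List Int → List Bool × PySem.Set Int
  | [] => ([], PySem.Set.empty)
  | v :: rest =>
    let p := markKeep allowedS rest
    if PySem.Set.contains allowedS v ∧ ¬ PySem.Set.contains p.2 v then
      (true :: p.1, PySem.Set.add p.2 v)
    else (false :: p.1, p.2)

-- the final comprehension over zip(keep, seq), consuming the fill iterator
-- ('next(fill, v)' = head if non-empty, else the original v)
def fillLoopB : List (Bool × Int) → List Int → List Int
  | [], _ => []
  | (k, v) :: rest, fill =>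
    if k then v :: fillLoopB rest fill
    else match fill with
      | x :: fs => x :: fillLoopB rest fs
      | [] => v :: fillLoopB rest []

def repair_sequence_alt (seq : List Int) (allowed : List Int) : List Int :=
  let allowedS := PySem.Set.ofList allowed
  let keep := (markKeep allowedS seq).1
  let present := PySem.Set.ofList seq
  let fill := allowed.reverse.filter (fun x => ¬ PySem.Set.contains present x)
  fillLoopB (keep.zip seq) fill

-- ===== PRECONDITION & SPEC =====
def Spec_repair_sequence (seq : List Int) (allowed : List Int) (out : List Int) : Prop := out = repair_sequence_alt seq allowed
instance (seq : List Int) (allowed : List Int) (out : List Int) : Decidable (Spec_repair_sequence seq allowed out) := by unfold Spec_repair_sequence; infer_instance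

-- ===== CLAIM (what is proved, stated in full; the proofs are below) =====
def Claim_equal_repair_sequence : Prop := ∀ (seq : List Int) (allowed : List Int), Dom_repair_sequence seq allowed → Spec_repair_sequence seq allowed (repair_sequence seq allowed)

-- ===== LEMMAS AND PROOFS =====

-- reference loop both programs reduce to: keep v iff it is allowed and this is its last occurrence
def refLoop (allowed : List Int) : List Int → List Int → List Int
  | [], _ => []
  | v :: rest, fill =>
    if v ∈ allowed ∧ v ∉ rest then v :: refLoop allowed rest fill
    else match fill with
      | x :: fs => x :: refLoop allowed rest fs
      | [] => v :: refLoop allowed rest []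

-- the seen-set after marking a suffix holds exactly the allowed values occurring in it
theorem markKeep_seen (allowed : List Int) (l : List Int) (v : Int) :
    v ∈ (markKeep (PySem.Set.ofList allowed) l).2 ↔ v ∈ allowed ∧ v ∈ l := by
  induction l with
  | nil => simp [markKeep, PySem.Set.empty]
  | cons x xs ih =>
    simp only [markKeep]
    split_ifs with h
    · have hx : x ∈ allowed := by
        have := h.1
        simpa [PySem.Set.contains, PySem.Set.mem_ofList] using this
      simp only [PySem.Set.mem_add, ih, List.mem_cons]
      constructor
      · rintro (⟨hva, hvx⟩ | rfl)
        · exact ⟨hva, Or.inr hvx⟩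
        · exact ⟨hx, Or.inl rfl⟩
      · rintro ⟨hva, rfl | hvxs⟩
        · exact Or.inr rfl
        · exact Or.inl ⟨hva, hvxs⟩
    · rw [ih]
      simp only [PySem.Set.contains, not_and, not_not] at h
      constructor
      · rintro ⟨hva, hvx⟩
        exact ⟨hva, List.mem_cons_of_mem _ hvx⟩
      · rintro ⟨hva, hvm⟩
        rcases List.mem_cons.mp hvm with rfl | hvxs
        · refine ⟨hva, ?_⟩
          have hseen := h (by simpa [PySem.Set.mem_ofList] using hva)
          have := (ih.mp (by simpa using hseen)).2
          exact this
        · exact ⟨hva, hvxs⟩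

-- B's two stages compose to refLoop
theorem loopB_eq_ref (allowed : List Int) (l fill : List Int) :
    fillLoopB (((markKeep (PySem.Set.ofList allowed) l).1).zip l) fill = refLoop allowed l fill := by
  induction l generalizing fill with
  | nil => simp [markKeep, fillLoopB, refLoop]
  | cons v rest ih =>
    have hcond : (PySem.Set.contains (PySem.Set.ofList allowed) v ∧
        ¬ PySem.Set.contains (markKeep (PySem.Set.ofList allowed) rest).2 v) ↔
        (v ∈ allowed ∧ v ∉ rest) := by
      simp only [PySem.Set.contains, List.contains_iff_mem, PySem.Set.mem_ofList,
        markKeep_seen, not_and]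
      tauto
    by_cases hk : v ∈ allowed ∧ v ∉ rest
    · simp only [markKeep, if_pos (hcond.mpr hk), List.zip_cons_cons, fillLoopB, if_true,
        refLoop, if_pos hk, ih]
    · simp only [markKeep, if_neg (fun hh => hk (hcond.mp hh)), List.zip_cons_cons, fillLoopB,
        Bool.false_eq_true, if_false, refLoop, if_neg hk]
      cases fill with
      | nil => rw [ih]
      | cons x fs =>
        show x :: fillLoopB ((markKeep (PySem.Set.ofList allowed) rest).1.zip rest) fs
          = x :: refLoop allowed rest fs
        rw [ih]

-- A's loop equals refLoop, under the invariant that counts tracks remaining multiplicities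
theorem loopA_eq_ref (allowed : List Int) (rest : List Int) (cs : PySem.Dict Int Int)
    (fill : List Int)
    (hinv : ∀ v, v ∈ allowed → v ∈ rest → cs.getD v 0 = (rest.count v : Int)) :
    repairLoopA allowed rest cs fill.reverse = refLoop allowed rest fill := by
  induction rest generalizing cs fill with
  | nil => simp [repairLoopA, refLoop]
  | cons v rest ih =>
    have hstep : ∀ (cs' : PySem.Dict Int Int),
        (∀ w, w ∈ allowed → w ∈ rest → cs'.getD w 0 = (rest.count w : Int)) →
        ∀ f : List Int, repairLoopA allowed rest cs' f.reverse = refLoop allowed rest f :=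
      fun cs' h f => ih cs' f h
    by_cases hv : v ∈ allowed
    · have hc : cs.getD v 0 = ((v :: rest).count v : Int) := hinv v hv (List.mem_cons_self ..)
      rw [List.count_cons_self] at hc
      by_cases hdup : v ∈ rest
      · have hgt : cs.getD v 0 > 1 := by
          have : 0 < rest.count v := List.count_pos_iff.mpr hdup
          omega
        have hinv' : ∀ w, w ∈ allowed → w ∈ rest →
            (cs.insert v (cs.getD v 0 - 1)).getD w 0 = (rest.count w : Int) := by
          intro w hwA hwR
          rw [PySem.Dict.getD_insert]
          split_ifs with hwv
          · subst hwv; omega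
          · rw [hinv w hwA (List.mem_cons_of_mem _ hwR)]
            norm_cast
            simp [Ne.symm hwv]
        simp only [repairLoopA, refLoop, if_pos hgt, hv, hdup, not_true_eq_false,
          and_false, if_false]
        cases fill with
        | nil => simpa using hstep _ hinv' []
        | cons x fs =>
          rw [List.reverse_cons, List.getLast?_concat]
          simpa [List.dropLast_concat] using hstep _ hinv' fs
      · have hle : ¬ cs.getD v 0 > 1 := by
          have : rest.count v = 0 := List.count_eq_zero.mpr hdup
          omega
        have hinv' : ∀ w, w ∈ allowed → w ∈ rest → cs.getD w 0 = (rest.count w : Int) := by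
          intro w hwA hwR
          have hwv : w ≠ v := fun h => hdup (h ▸ hwR)
          rw [hinv w hwA (List.mem_cons_of_mem _ hwR)]
          norm_cast
          simp [Ne.symm hwv]
        simp only [repairLoopA, refLoop, if_neg hle, hv, hdup, not_false_eq_true,
          and_true, if_true]
        rw [hstep _ hinv' fill]
    · have hinv' : ∀ w, w ∈ allowed → w ∈ rest → cs.getD w 0 = (rest.count w : Int) := by
        intro w hwA hwR
        have hwv : w ≠ v := fun h => hv (h ▸ hwA)
        rw [hinv w hwA (List.mem_cons_of_mem _ hwR)]
        norm_cast
        simp [Ne.symm hwv]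
      simp only [repairLoopA, refLoop, hv, false_and, if_false]
      cases fill with
      | nil => simpa using hstep _ hinv' []
      | cons x fs =>
        rw [List.reverse_cons, List.getLast?_concat]
        simpa [List.dropLast_concat] using hstep _ hinv' fs

-- ===== VERDICT (by name: the statement is the Claim_ definition above) =====
theorem repair_sequence_spec : Claim_equal_repair_sequence := by
  intro seq allowed _
  unfold Spec_repair_sequence repair_sequence repair_sequence_alt
  simp only []
  -- B's fill list is A's missing list reversed
  have hfill : allowed.reverse.filter (fun x => ¬ PySem.Set.contains (PySem.Set.ofList seq) x)
      = (allowed.filter (fun num => ¬ seq.contains num)).reverse := by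
    rw [← List.filter_reverse]
    congr 1
    funext num
    simp [PySem.Set.mem_ofList, PySem.Set.contains]
  rw [hfill]
  rw [loopB_eq_ref]
  have hA := loopA_eq_ref allowed seq
      (seq.foldl (fun d num => d.modify num 0 (· + 1)) PySem.Dict.empty)
      ((allowed.filter (fun num => ¬ seq.contains num)).reverse)
      (by
        intro v _ _
        rw [PySem.Dict.getD_foldl_modify_add_one]
        simp)
  rw [List.reverse_reverse] at hA
  rw [hA]
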